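-- pv_equiv track=rewrite | github.com/HarjjotSinghh/leetcode | 2024/July/31_07_2024.py | bfs
-- ===== SOURCE A (Python) =====
-- import math
--
-- def bfs(books, shelf_width):
--     queue = [(shelf_width - books[0][0], books[0][1], 0)]
--     for b in range(1, len(books)):
--         queue_size = len(queue)
--         while queue_size > 0:
--             queue_size -= 1
--             current = queue.pop(0)
--             if current[0] >= books[b][0]:
--                 queue.append((current[0]-books[b][0], max(current[1], books[b][1]), current[2]))
--             if current[0] < books[b][0] or books[b][1] > current[1]:
--                 queue.append((shelf_width-books[b][0], books[b][1], current[2] + current[1]))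
--     min_height = math.inf
--     for x in queue:
--         min_height = min(min_height, x[1] + x[2])
--     return min_height
-- ===== SOURCE B (Python) =====
-- def bfs(books, shelf_width):
--     # Same pruned search as a recursion over the remaining books: no queue,
--     # no accumulated-cost component (costs of closed shelves are added on the way up).
--     def best(rest, rem, h):
--         if not rest:
--             return h
--         w, bh = rest[0][0], rest[0][1]
--         if rem >= w:
--             if bh > h:
--                 return min(best(rest[1:], rem - w, max(h, bh)),
--                            h + best(rest[1:], shelf_width - w, bh))
--             return best(rest[1:], rem - w, max(h, bh))
--         return h + best(rest[1:], shelf_width - w, bh)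
--     return best(books[1:], shelf_width - books[0][0], books[0][1])
-- ===== Notes on version B (the rewrite author's own statement) =====
-- stated objective: simpler
-- what changed: Replaces the explicit BFS queue of (remaining-width, height, accumulated-cost) triples with per-level pop(0)/append juggling by a direct recursion over the remaining books that carries only (remaining-width, current-shelf-height) and adds closed-shelf costs on the way up.
import Mathlib
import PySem

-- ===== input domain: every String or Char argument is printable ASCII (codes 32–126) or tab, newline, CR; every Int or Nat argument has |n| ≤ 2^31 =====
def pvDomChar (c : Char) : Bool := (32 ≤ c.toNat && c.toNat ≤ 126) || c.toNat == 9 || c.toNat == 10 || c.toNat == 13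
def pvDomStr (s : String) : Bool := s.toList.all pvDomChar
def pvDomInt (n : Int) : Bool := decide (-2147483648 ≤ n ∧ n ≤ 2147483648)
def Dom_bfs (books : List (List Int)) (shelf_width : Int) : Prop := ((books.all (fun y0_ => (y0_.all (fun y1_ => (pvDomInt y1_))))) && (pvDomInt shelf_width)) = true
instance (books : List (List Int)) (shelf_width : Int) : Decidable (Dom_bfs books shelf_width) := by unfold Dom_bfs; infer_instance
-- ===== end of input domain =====

-- B replaces A's explicit BFS queue (per-level pop(0)/append of (rem, height, cost) triples)
-- by a direct recursion over the remaining books carrying only (rem, height); same return value.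

-- ===== PORT A =====
-- the inner `while queue_size > 0` loop for one book (w, bh): pops queue_size elements
-- from the front, appending their children; the [] case is unreachable (len ≥ queue_size).
def bfsInner (W w bh : Int) : Nat → List (Int × Int × Int) → List (Int × Int × Int)
  | 0, q => q
  | k + 1, q =>
    match q with
    | [] => []
    | c :: rest =>
      let r1 := if c.1 ≥ w then rest ++ [(c.1 - w, max c.2.1 bh, c.2.2)] else rest
      let r2 := if c.1 < w ∨ bh > c.2.1 then r1 ++ [(W - w, bh, c.2.2 + c.2.1)] else r1
      bfsInner W w bh k r2

-- min_height = math.inf; for x in queue: min_height = min(min_height, x[1]+x[2])  (none = inf)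
def bfsFinalMin (q : List (Int × Int × Int)) : Option Int :=
  q.foldl (fun m x => some (match m with | none => x.2.1 + x.2.2 | some v => min v (x.2.1 + x.2.2))) none

def bfs (books : List (List Int)) (shelf_width : Int) : Int :=
  let b0 := PySem.List.pyGetD books 0 []
  let queue0 : List (Int × Int × Int) :=
    [(shelf_width - PySem.List.pyGetD b0 0 0, PySem.List.pyGetD b0 1 0, 0)]
  let qf := (PySem.List.pyRange 1 (books.length : Int) 1).foldl
    (fun queue b =>
      let bk := PySem.List.pyGetD books b []
      bfsInner shelf_width (PySem.List.pyGetD bk 0 0) (PySem.List.pyGetD bk 1 0) queue.length queue)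
    queue0
  -- math.inf is returned only when the queue is empty, unreachable under Pre_
  (bfsFinalMin qf).getD 0

-- ===== PORT B =====
def bfsBest (W : Int) : List (List Int) → Int → Int → Int
  | [], _, h => h
  | bk :: rest, rem, h =>
    let w := PySem.List.pyGetD bk 0 0
    let bh := PySem.List.pyGetD bk 1 0
    if rem ≥ w then
      if bh > h then
        min (bfsBest W rest (rem - w) (max h bh)) (h + bfsBest W rest (W - w) bh)
      else bfsBest W rest (rem - w) (max h bh)
    else h + bfsBest W rest (W - w) bh

def bfs_alt (books : List (List Int)) (shelf_width : Int) : Int :=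
  match books with
  | [] => 0
  | b0 :: rest =>
    bfsBest shelf_width rest (shelf_width - PySem.List.pyGetD b0 0 0) (PySem.List.pyGetD b0 1 0)

-- ===== PRECONDITION & SPEC =====
-- Pre_ excludes exactly the inputs on which A raises IndexError: an empty book list, or a
-- book with fewer than two entries (every book's [0] and [1] are read); B raises there too.
def Pre_bfs (books : List (List Int)) (shelf_width : Int) : Prop :=
  books ≠ [] ∧ ∀ bk ∈ books, 2 ≤ bk.length
instance (books : List (List Int)) (shelf_width : Int) : Decidable (Pre_bfs books shelf_width) := by
  unfold Pre_bfs; infer_instance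
def pvWitness_bfs : List (List Int) × Int := ([[1, 1], [2, 3], [2, 1]], 4)

def Spec_bfs (books : List (List Int)) (shelf_width : Int) (out : Int) : Prop := out = bfs_alt books shelf_width
instance (books : List (List Int)) (shelf_width : Int) (out : Int) : Decidable (Spec_bfs books shelf_width out) := by unfold Spec_bfs; infer_instance

-- ===== CLAIM (what is proved, stated in full; the proofs are below) =====
def Claim_equal_bfs : Prop := ∀ (books : List (List Int)) (shelf_width : Int), Dom_bfs books shelf_width → Pre_bfs books shelf_width → Spec_bfs books shelf_width (bfs books shelf_width)

-- ===== LEMMAS AND PROOFS =====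

-- the two children A appends for state c when placing book (w, bh)
def bfsChild (W w bh : Int) (c : Int × Int × Int) : List (Int × Int × Int) :=
  (if c.1 ≥ w then [(c.1 - w, max c.2.1 bh, c.2.2)] else []) ++
  (if c.1 < w ∨ bh > c.2.1 then [(W - w, bh, c.2.2 + c.2.1)] else [])

lemma bfsInner_flatMap (W w bh : Int) (q t : List (Int × Int × Int)) :
    bfsInner W w bh q.length (q ++ t) = t ++ q.flatMap (bfsChild W w bh) := by
  induction q generalizing t with
  | nil => simp [bfsInner]
  | cons c q ih =>
    have h1 : bfsInner W w bh (c :: q).length ((c :: q) ++ t)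
        = bfsInner W w bh q.length (q ++ (t ++ bfsChild W w bh c)) := by
      simp only [List.length_cons, List.cons_append, bfsInner, bfsChild]
      split_ifs <;> simp
    rw [h1, ih]; simp [List.flatMap_cons]

-- option-valued minimum of a list of ints (none = math.inf)
def intMin? (l : List Int) : Option Int :=
  l.foldl (fun m v => some (match m with | none => v | some u => min u v)) none

def optMin : Option Int → Option Int → Option Int
  | none, y => y
  | some x, none => some x
  | some x, some y => some (min x y)

lemma intMin?_go (m : Int) (l : List Int) :
    l.foldl (fun m v => some (match m with | none => v | some u => min u v)) (some m)
      = some (l.foldl min m) := by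
  induction l generalizing m with
  | nil => rfl
  | cons x l ih => simp [List.foldl_cons, ih]

lemma foldl_min_min (m y : Int) (b : List Int) :
    b.foldl min (min m y) = min m (b.foldl min y) := by
  induction b generalizing y with
  | nil => rfl
  | cons z b ih =>
    simp only [List.foldl_cons]
    rw [min_assoc, ih]

lemma intMin?_append (a b : List Int) :
    intMin? (a ++ b) = optMin (intMin? a) (intMin? b) := by
  cases a with
  | nil => simp [intMin?, optMin]
  | cons x a =>
    cases b with
    | nil =>
      simp only [List.append_nil, intMin?, List.foldl_cons]
      rw [intMin?_go]
      rfl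
    | cons y b =>
      simp only [intMin?, List.cons_append, List.foldl_cons]
      rw [intMin?_go, intMin?_go, intMin?_go]
      simp only [optMin]
      congr 1
      rw [List.foldl_append]
      simp only [List.foldl_cons]
      exact foldl_min_min _ _ b

lemma intMin?_cons (x : Int) (l : List Int) :
    intMin? (x :: l) = optMin (some x) (intMin? l) := by
  have := intMin?_append [x] l
  simpa [intMin?] using this

lemma bfsFinalMin_eq (q : List (Int × Int × Int)) :
    bfsFinalMin q = intMin? (q.map (fun x => x.2.1 + x.2.2)) := by
  simp [bfsFinalMin, intMin?, List.foldl_map]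

-- per-state: min over the children A appends = acc + B's one-step recursion
lemma child_min (W : Int) (bk : List Int) (rest : List (List Int)) (c : Int × Int × Int) :
    intMin? ((bfsChild W (PySem.List.pyGetD bk 0 0) (PySem.List.pyGetD bk 1 0) c).map
        (fun d => d.2.2 + bfsBest W rest d.1 d.2.1))
      = some (c.2.2 + bfsBest W (bk :: rest) c.1 c.2.1) := by
  obtain ⟨rem, h, acc⟩ := c
  simp only [bfsChild, bfsBest]
  generalize PySem.List.pyGetD bk 0 0 = w
  generalize PySem.List.pyGetD bk 1 0 = bh
  by_cases h1 : rem ≥ w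
  · by_cases h2 : bh > h
    · have hc : rem < w ∨ bh > h := Or.inr h2
      simp only [if_pos h1, if_pos hc, if_pos h2]
      simp [intMin?]
      omega
    · have hc : ¬(rem < w ∨ bh > h) := by omega
      simp [if_pos h1, if_neg hc, if_neg h2, intMin?]
  · have hc : rem < w ∨ bh > h := Or.inl (by omega)
    simp [if_neg h1, if_pos hc, intMin?]
    omega

-- lifting child_min through flatMap
lemma flatMap_min (W : Int) (bk : List Int) (rest : List (List Int))
    (q : List (Int × Int × Int)) :
    intMin? ((q.flatMap (bfsChild W (PySem.List.pyGetD bk 0 0) (PySem.List.pyGetD bk 1 0))).map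
        (fun d => d.2.2 + bfsBest W rest d.1 d.2.1))
      = intMin? (q.map (fun c => c.2.2 + bfsBest W (bk :: rest) c.1 c.2.1)) := by
  induction q with
  | nil => rfl
  | cons c q ih =>
    rw [List.flatMap_cons, List.map_append, intMin?_append, child_min, List.map_cons,
      intMin?_cons, ih]

-- main invariant: running A's outer loop and then taking the final min equals
-- the min over the queue of (accumulated cost + B's recursion over the remaining books)
lemma bfs_invariant (W : Int) (rest : List (List Int)) (q : List (Int × Int × Int)) :
    bfsFinalMin (rest.foldl (fun queue bk =>
        bfsInner W (PySem.List.pyGetD bk 0 0) (PySem.List.pyGetD bk 1 0) queue.length queue) q)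
      = intMin? (q.map (fun c => c.2.2 + bfsBest W rest c.1 c.2.1)) := by
  induction rest generalizing q with
  | nil =>
    simp only [List.foldl_nil, bfsFinalMin_eq]
    congr 1
    exact List.map_congr_left fun c _ => by obtain ⟨a, b, d⟩ := c; simp [bfsBest]; ring
  | cons bk rest ih =>
    have hstep : bfsInner W (PySem.List.pyGetD bk 0 0) (PySem.List.pyGetD bk 1 0) q.length q
        = q.flatMap (bfsChild W (PySem.List.pyGetD bk 0 0) (PySem.List.pyGetD bk 1 0)) := by
      simpa using bfsInner_flatMap W _ _ q []
    rw [List.foldl_cons, hstep, ih, flatMap_min]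

theorem bfs_equal (books : List (List Int)) (shelf_width : Int) :
    bfs books shelf_width = bfs_alt books shelf_width := by
  cases books with
  | nil =>
    simp [bfs, bfs_alt, PySem.List.pyRange, bfsFinalMin, PySem.List.pyGetD,
      PySem.List.pyGet?, PySem.List.pyIdx?]
  | cons b0 rest =>
    simp only [bfs, bfs_alt]
    rw [PySem.List.foldl_pyRange_pyGetD' (a := 1) (b0 :: rest) ([] : List Int)
      (fun queue bk => bfsInner shelf_width (PySem.List.pyGetD bk 0 0)
        (PySem.List.pyGetD bk 1 0) queue.length queue) _ (by norm_num)]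
    simp only [Int.toNat_one, List.drop_succ_cons, List.drop_zero]
    rw [bfs_invariant]
    have h0 : PySem.List.pyGetD (b0 :: rest) 0 [] = b0 := by
      simp [PySem.List.pyGetD, PySem.List.pyGet?, PySem.List.pyIdx?]
    rw [h0]
    simp [intMin?]

-- ===== VERDICT (by name: the statement is the Claim_ definition above) =====
theorem bfs_spec : Claim_equal_bfs := by
  intro books shelf_width _ _
  exact bfs_equal books shelf_width
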